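-- pv_equiv track=rewrite | github.com/junjihashimoto/py-stacked-dag | stackeddag.py | _getDepth2
-- ===== SOURCE A (Python) =====
-- def _getDepth2(edges,dmap,v):
--   if v in dmap:
--     return dmap[v]
--   else:
--     if v in edges:
--       m = 1+max(map(lambda x: _getDepth2(edges,dmap,x),list(edges[v])))
--       dmap[v]=m
--       return m
--     else:
--       dmap[v]=0
--       return 0
-- ===== SOURCE B (Python) =====
-- def _getDepth2(edges, dmap, v):
--     # Iterative post-order DFS with an explicit (node, expanded) stack instead
--     # of memoized recursion; only vertices reachable from v are touched.
--     # (Return-value equivalence: like the original, this mutates dmap.)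
--     stack = [(v, False)]
--     while stack:
--         node, expanded = stack.pop()
--         if node in dmap:
--             continue
--         if node not in edges:
--             dmap[node] = 0
--         elif expanded:
--             dmap[node] = 1 + max(dmap[c] for c in edges[node])
--         else:
--             stack.append((node, True))
--             for c in edges[node]:
--                 stack.append((c, False))
--     return dmap[v]
-- ===== Notes on version B (the rewrite author's own statement) =====
-- stated objective: alternative
-- what changed: Replaces the memoized top-down recursion with an iterative post-order DFS driven by an explicit (node, expanded) stack: nodes are pushed, expanded once, and resolved from dmap values when revisited, with no recursion and no call stack.
import Mathlib
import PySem

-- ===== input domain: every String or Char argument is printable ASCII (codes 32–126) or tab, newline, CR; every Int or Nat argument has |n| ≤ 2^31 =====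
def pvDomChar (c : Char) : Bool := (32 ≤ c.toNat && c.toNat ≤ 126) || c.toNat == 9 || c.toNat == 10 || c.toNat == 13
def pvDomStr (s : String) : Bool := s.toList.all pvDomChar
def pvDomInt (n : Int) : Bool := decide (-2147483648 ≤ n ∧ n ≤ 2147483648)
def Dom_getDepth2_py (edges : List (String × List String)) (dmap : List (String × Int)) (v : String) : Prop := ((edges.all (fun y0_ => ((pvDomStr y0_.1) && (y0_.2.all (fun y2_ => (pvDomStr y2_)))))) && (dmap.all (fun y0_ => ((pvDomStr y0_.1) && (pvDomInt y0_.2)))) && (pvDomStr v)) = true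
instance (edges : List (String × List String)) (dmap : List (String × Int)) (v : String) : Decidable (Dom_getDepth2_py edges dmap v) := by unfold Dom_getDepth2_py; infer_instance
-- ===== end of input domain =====

-- B replaces the memoized recursion by an iterative post-order DFS with an explicit
-- (node, expanded) stack; return-value equivalence only: both Pythons mutate dmap.

-- lookup in the edges dict (shared by both ports: both Pythons do `edges[...]`)
def pvLookE (E : List (String × List String)) (k : String) : Option (List String) :=
  PySem.Dict.get? ⟨E⟩ k

-- ===== PORT A =====
-- recursion is on the explicit fuel argument; under Pre_ the fuel chosen below is
-- never exhausted (a totality guard only)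
def pyA (E : List (String × List String)) :
    Nat → String → PySem.Dict String Int → Int × PySem.Dict String Int
  | 0, _, d => (0, d)
  | n+1, v, d =>
    match d.get? v with
    | some x => (x, d)                                   -- if v in dmap: return dmap[v]
    | none =>
      match pvLookE E v with
      | some l =>                                        -- if v in edges:
        -- m = 1+max(map(lambda x: _getDepth2(edges,dmap,x), list(edges[v])))
        let p := l.foldl (fun acc c =>
          let r := pyA E n c acc.2
          (acc.1 ++ [r.1], r.2)) (([] : List Int), d)
        let m := 1 + (PySem.List.max? p.1 (fun y => y)).getD 0   -- max([]) raises in Python: outside Pre_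
        (m, p.2.insert v m)                              -- dmap[v] = m
      | none => (0, d.insert v 0)                        -- dmap[v] = 0; return 0

def getDepth2_py (edges : List (String × List String)) (dmap : List (String × Int)) (v : String) : Int :=
  (pyA edges ((v :: edges.flatMap (fun p => p.2)).dedup.length + 1) v ⟨dmap⟩).1

-- ===== PORT B =====
-- the `while stack:` loop of Source B; fuel is a totality guard only (under Pre_ the
-- fuel chosen below is never exhausted).  The stack is kept top-first, so
-- Python's append/pop at the end becomes cons/uncons at the head.
def pyB (E : List (String × List String)) :
    Nat → List (String × Bool) → PySem.Dict String Int → PySem.Dict String Int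
  | 0, _, d => d
  | _+1, [], d => d
  | f+1, (node, expanded) :: rest, d =>
    if (d.get? node).isSome then pyB E f rest d          -- if node in dmap: continue
    else
      match pvLookE E node with
      | none => pyB E f rest (d.insert node 0)           -- dmap[node] = 0
      | some l =>
        if expanded then
          -- dmap[node] = 1 + max(dmap[c] for c in edges[node])
          -- (under Pre_ every c is in dmap, so getD is never taken; max over an
          --  empty successor list raises in Python: outside Pre_)
          let m := 1 + (PySem.List.max? (l.map (fun c => (d.get? c).getD 0)) (fun y => y)).getD 0
          pyB E f rest (d.insert node m)
        else
          -- stack.append((node, True)); for c in edges[node]: stack.append((c, False))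
          pyB E f ((l.map (fun c => (c, false))).reverse ++ (node, true) :: rest) d

def getDepth2_py_alt (edges : List (String × List String)) (dmap : List (String × Int)) (v : String) : Int :=
  (((pyB edges
      (((edges.flatMap (fun p => p.2)).length + 2) ^
          ((v :: edges.flatMap (fun p => p.2)).dedup.length + 1) + 1)
      [(v, false)] ⟨dmap⟩).get? v).getD 0)               -- return dmap[v] (present under Pre_)

-- ===== PRECONDITION & SPEC =====
-- reachability closure of the successor graph, cut at vertices already in dmap
def rstepP (E : List (String × List String)) (d0 : List (String × Int)) (u : String) : List String :=
  if (PySem.Dict.get? (⟨d0⟩ : PySem.Dict String Int) u).isSome then []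
  else (pvLookE E u).getD []

def expandP (E : List (String × List String)) (d0 : List (String × Int)) (s : List String) : List String :=
  (s ++ s.flatMap (rstepP E d0)).dedup

def reachN (E : List (String × List String)) (d0 : List (String × Int)) :
    Nat → List String → List String
  | 0, s => s.dedup
  | n+1, s => expandP E d0 (reachN E d0 n s)

def closureC (E : List (String × List String)) (d0 : List (String × Int)) (s : List String) : List String :=
  reachN E d0 ((s ++ E.flatMap (fun p => p.2)).dedup.length + 1) s

-- Pre_ excludes exactly the inputs on which A does not return: a vertex reachable
-- from v through unmemoized vertices whose successor list is empty (A and B both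
-- raise ValueError from max()) or that lies on a reachable cycle (A hits
-- RecursionError, B loops).
def Pre_getDepth2_py (edges : List (String × List String)) (dmap : List (String × Int)) (v : String) : Prop :=
  ∀ u ∈ closureC edges dmap [v],
    PySem.Dict.get? (⟨dmap⟩ : PySem.Dict String Int) u = none →
      pvLookE edges u ≠ some [] ∧ u ∉ closureC edges dmap (rstepP edges dmap u)

instance (edges : List (String × List String)) (dmap : List (String × Int)) (v : String) : Decidable (Pre_getDepth2_py edges dmap v) := by unfold Pre_getDepth2_py; infer_instance

def pvWitness_getDepth2_py : (List (String × List String)) × (List (String × Int)) × String :=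
  ([("a", ["b", "c"]), ("b", ["c"])], [("c", 4)], "a")

def Spec_getDepth2_py (edges : List (String × List String)) (dmap : List (String × Int)) (v : String) (out : Int) : Prop := out = getDepth2_py_alt edges dmap v
instance (edges : List (String × List String)) (dmap : List (String × Int)) (v : String) (out : Int) : Decidable (Spec_getDepth2_py edges dmap v out) := by unfold Spec_getDepth2_py; infer_instance

-- ===== CLAIM (what is proved, stated in full; the proofs are below) =====
def Claim_equal_getDepth2_py : Prop := ∀ (edges : List (String × List String)) (dmap : List (String × Int)) (v : String), Dom_getDepth2_py edges dmap v → Pre_getDepth2_py edges dmap v → Spec_getDepth2_py edges dmap v (getDepth2_py edges dmap v)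

-- ===== LEMMAS AND PROOFS =====

-- the common specification value: fueled depth, cut at dmap entries
def dspec (E : List (String × List String)) (d0 : List (String × Int)) :
    Nat → String → Int
  | 0, _ => 0
  | n+1, u =>
    match PySem.Dict.get? (⟨d0⟩ : PySem.Dict String Int) u with
    | some x => x
    | none =>
      match pvLookE E u with
      | some l => 1 + (PySem.List.max? (l.map (dspec E d0 n)) (fun y => y)).getD 0
      | none => 0

def KK (E : List (String × List String)) (d0 : List (String × Int)) (u : String) : Nat :=
  (closureC E d0 [u]).length

def depthV (E : List (String × List String)) (d0 : List (String × Int)) (u : String) : Int :=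
  dspec E d0 (KK E d0 u) u

-- ---------- closure (reachability) lemmas ----------

theorem pvLookE_mem {E : List (String × List String)} {u : String} {l : List String}
    (h : pvLookE E u = some l) : (u, l) ∈ E :=
  PySem.Dict.mem_items_of_get?_eq_some (d := ⟨E⟩) h

theorem rstepP_eq_of {E : List (String × List String)} {d0 : List (String × Int)} {u : String}
    {l : List String} (hd : PySem.Dict.get? (⟨d0⟩ : PySem.Dict String Int) u = none)
    (hE : pvLookE E u = some l) : rstepP E d0 u = l := by
  unfold rstepP; rw [hd, hE]; simp

theorem rstepP_eq_nil {E : List (String × List String)} {d0 : List (String × Int)} {u : String}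
    (hd : (PySem.Dict.get? (⟨d0⟩ : PySem.Dict String Int) u).isSome) : rstepP E d0 u = [] := by
  unfold rstepP; rw [if_pos hd]

theorem nodup_reachN (E : List (String × List String)) (d0 : List (String × Int))
    (n : Nat) (s : List String) : (reachN E d0 n s).Nodup := by
  cases n with
  | zero => exact List.nodup_dedup s
  | succ m => exact List.nodup_dedup _

theorem subset_expandP (E : List (String × List String)) (d0 : List (String × Int))
    (s : List String) : s ⊆ expandP E d0 s := by
  intro x hx
  unfold expandP
  exact (List.mem_dedup).2 (List.mem_append_left _ hx)

theorem expandP_mono (E : List (String × List String)) (d0 : List (String × Int))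
    {s t : List String} (h : s ⊆ t) : expandP E d0 s ⊆ expandP E d0 t := by
  intro x hx
  unfold expandP at hx ⊢
  rw [List.mem_dedup] at hx ⊢
  rcases List.mem_append.1 hx with h1 | h2
  · exact List.mem_append_left _ (h h1)
  · rcases List.mem_flatMap.1 h2 with ⟨u, hu, hx⟩
    exact List.mem_append_right _ (List.mem_flatMap.2 ⟨u, h hu, hx⟩)

theorem subset_reachN (E : List (String × List String)) (d0 : List (String × Int))
    (n : Nat) (s : List String) : s ⊆ reachN E d0 n s := by
  induction n with
  | zero => intro x hx; exact (List.mem_dedup).2 hx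
  | succ m ih => exact fun x hx => subset_expandP E d0 _ (ih hx)

theorem reachN_le_subset (E : List (String × List String)) (d0 : List (String × Int))
    (s : List String) {n m : Nat} (h : n ≤ m) : reachN E d0 n s ⊆ reachN E d0 m s := by
  induction m with
  | zero => cases Nat.le_zero.1 h; exact fun x hx => hx
  | succ k ih =>
    rcases Nat.lt_or_ge n (k+1) with hlt | hge
    · exact fun x hx => subset_expandP E d0 _ (ih (Nat.lt_succ_iff.1 hlt) hx)
    · have : n = k + 1 := Nat.le_antisymm h hge
      subst this; exact fun x hx => hx

def stableR (E : List (String × List String)) (d0 : List (String × Int))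
    (n : Nat) (s : List String) : Prop :=
  expandP E d0 (reachN E d0 n s) ⊆ reachN E d0 n s

theorem reachN_stable_ge (E : List (String × List String)) (d0 : List (String × Int))
    {n : Nat} {s : List String} (hst : stableR E d0 n s) :
    ∀ m, n ≤ m → reachN E d0 m s ⊆ reachN E d0 n s := by
  intro m
  induction m with
  | zero => intro h; cases Nat.le_zero.1 h; exact fun x hx => hx
  | succ k ih =>
    intro h
    rcases Nat.lt_or_ge n (k+1) with hlt | hge
    · have hk := ih (Nat.lt_succ_iff.1 hlt)
      exact fun x hx => hst (expandP_mono E d0 hk hx)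
    · have : n = k + 1 := Nat.le_antisymm h hge
      subst this; exact fun x hx => hx

theorem le_length_of_nodup_subset {l m : List String} (hl : l.Nodup) (hm : m.Nodup)
    (h : l ⊆ m) : l.length ≤ m.length := by
  have h1 : l.toFinset ⊆ m.toFinset := by
    intro x hx
    exact List.mem_toFinset.2 (h (List.mem_toFinset.1 hx))
  have := Finset.card_le_card h1
  rwa [List.toFinset_card_of_nodup hl, List.toFinset_card_of_nodup hm] at this

theorem lt_length_of_nodup_ssubset {l m : List String} (hl : l.Nodup) (hm : m.Nodup)
    (h : l ⊆ m) {x : String} (hxm : x ∈ m) (hxl : x ∉ l) : l.length < m.length := by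
  have h1 : l.toFinset ⊂ m.toFinset := by
    constructor
    · intro y hy; exact List.mem_toFinset.2 (h (List.mem_toFinset.1 hy))
    · intro hc
      exact hxl (List.mem_toFinset.1 (hc (List.mem_toFinset.2 hxm)))
  have := Finset.card_lt_card h1
  rwa [List.toFinset_card_of_nodup hl, List.toFinset_card_of_nodup hm] at this

theorem rstepP_subset (E : List (String × List String)) (d0 : List (String × Int))
    (u : String) : rstepP E d0 u ⊆ E.flatMap (fun p => p.2) := by
  unfold rstepP
  split
  · exact fun x hx => absurd hx (List.not_mem_nil)
  · cases hE : pvLookE E u with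
    | none => simp
    | some l =>
      intro x hx
      simp only [Option.getD_some] at hx
      have hmem : (u, l) ∈ E := pvLookE_mem hE
      exact List.mem_flatMap.2 ⟨(u, l), hmem, hx⟩

theorem reachN_subset_univ (E : List (String × List String)) (d0 : List (String × Int))
    (n : Nat) (s : List String) :
    reachN E d0 n s ⊆ (s ++ E.flatMap (fun p => p.2)).dedup := by
  induction n with
  | zero => intro x hx; exact (List.mem_dedup).2 (List.mem_append_left _ ((List.mem_dedup).1 hx))
  | succ k ih =>
    intro x hx
    have hx' := (List.mem_dedup).1 hx
    rcases List.mem_append.1 hx' with h1 | h2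
    · exact ih h1
    · rcases List.mem_flatMap.1 h2 with ⟨u, _, hxu⟩
      exact (List.mem_dedup).2 (List.mem_append_right _ (rstepP_subset E d0 u hxu))

theorem exists_stableR (E : List (String × List String)) (d0 : List (String × Int))
    (s : List String) :
    ∃ n ≤ (s ++ E.flatMap (fun p => p.2)).dedup.length + 1, stableR E d0 n s := by
  by_contra hc
  push_neg at hc
  set N := (s ++ E.flatMap (fun p => p.2)).dedup.length + 1 with hN
  have grow : ∀ n ≤ N, n ≤ (reachN E d0 n s).length := by
    intro n
    induction n with
    | zero => intro _; exact Nat.zero_le _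
    | succ k ih =>
      intro hkN
      have hk := ih (Nat.le_of_succ_le hkN)
      have hnst : ¬ stableR E d0 k s := hc k (Nat.le_of_succ_le hkN)
      rcases Set.not_subset.1 (by simpa [stableR] using hnst) with ⟨x, hx1, hx2⟩
      have hlt : (reachN E d0 k s).length < (reachN E d0 (k+1) s).length :=
        lt_length_of_nodup_ssubset (nodup_reachN E d0 k s) (nodup_reachN E d0 (k+1) s)
          (subset_expandP E d0 _) hx1 hx2
      omega
  have h1 := grow N (le_refl N)
  have h2 := le_length_of_nodup_subset (nodup_reachN E d0 N s) (List.nodup_dedup _)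
    (reachN_subset_univ E d0 N s)
  omega

theorem closureC_closed (E : List (String × List String)) (d0 : List (String × Int))
    (s : List String) {u : String} (hu : u ∈ closureC E d0 s) :
    rstepP E d0 u ⊆ closureC E d0 s := by
  rcases exists_stableR E d0 s with ⟨m, hm, hst⟩
  set N := (s ++ E.flatMap (fun p => p.2)).dedup.length + 1 with hN
  intro c hc
  have hsubNm : reachN E d0 N s ⊆ reachN E d0 m s := reachN_stable_ge E d0 hst N hm
  have hsubmN : reachN E d0 m s ⊆ reachN E d0 N s := reachN_le_subset E d0 s hm
  have hum : u ∈ reachN E d0 m s := hsubNm hu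
  have hcm : c ∈ expandP E d0 (reachN E d0 m s) := by
    unfold expandP
    exact (List.mem_dedup).2 (List.mem_append_right _ (List.mem_flatMap.2 ⟨u, hum, hc⟩))
  exact hsubmN (hst hcm)

theorem subset_closureC (E : List (String × List String)) (d0 : List (String × Int))
    (s : List String) : s ⊆ closureC E d0 s :=
  subset_reachN E d0 _ s

theorem closureC_least (E : List (String × List String)) (d0 : List (String × Int))
    (s T : List String) (hsT : s ⊆ T) (hT : ∀ u ∈ T, rstepP E d0 u ⊆ T) :
    closureC E d0 s ⊆ T := by
  have aux : ∀ n, reachN E d0 n s ⊆ T := by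
    intro n
    induction n with
    | zero => intro x hx; exact hsT ((List.mem_dedup).1 hx)
    | succ k ih =>
      intro x hx
      have hx' := (List.mem_dedup).1 hx
      rcases List.mem_append.1 hx' with h1 | h2
      · exact ih h1
      · rcases List.mem_flatMap.1 h2 with ⟨u, hu, hxu⟩
        exact hT u (ih hu) hxu
  exact aux _

theorem closureC_mono (E : List (String × List String)) (d0 : List (String × Int))
    {s s' : List String} (h : s ⊆ s') : closureC E d0 s ⊆ closureC E d0 s' :=
  closureC_least E d0 s _ (fun x hx => subset_closureC E d0 s' (h hx))
    (fun u hu => closureC_closed E d0 s' hu)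

theorem nodup_closureC (E : List (String × List String)) (d0 : List (String × Int))
    (s : List String) : (closureC E d0 s).Nodup := nodup_reachN E d0 _ s

theorem closureC_nil (E : List (String × List String)) (d0 : List (String × Int)) :
    closureC E d0 [] = [] := by
  have aux : ∀ n, reachN E d0 n ([] : List String) = [] := by
    intro n
    induction n with
    | zero => rfl
    | succ k ih => simp [reachN, expandP, ih]
  exact aux _

theorem KK_pos (E : List (String × List String)) (d0 : List (String × Int))
    (u : String) : 1 ≤ KK E d0 u := by
  have : u ∈ closureC E d0 [u] := subset_closureC E d0 [u] (List.mem_singleton.2 rfl)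
  have := List.length_pos_of_mem this
  unfold KK; omega

theorem KK_lt (E : List (String × List String)) (d0 : List (String × Int))
    {u : String} {l : List String}
    (hu : u ∉ closureC E d0 (rstepP E d0 u))
    (hd : PySem.Dict.get? (⟨d0⟩ : PySem.Dict String Int) u = none)
    (hE : pvLookE E u = some l) {c : String} (hc : c ∈ l) :
    KK E d0 c < KK E d0 u := by
  have hrs : rstepP E d0 u = l := rstepP_eq_of hd hE
  have hcr : c ∈ rstepP E d0 u := by rw [hrs]; exact hc
  have hcu : c ∈ closureC E d0 [u] := by
    have hum : u ∈ closureC E d0 [u] := subset_closureC E d0 [u] (List.mem_singleton.2 rfl)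
    exact closureC_closed E d0 [u] hum hcr
  have hsub : closureC E d0 [c] ⊆ closureC E d0 [u] :=
    closureC_least E d0 [c] _ (fun x hx => by rwa [List.mem_singleton.1 hx])
      (fun w hw => closureC_closed E d0 [u] hw)
  have hnotin : u ∉ closureC E d0 [c] := by
    intro hin
    have h1 : closureC E d0 [c] ⊆ closureC E d0 (rstepP E d0 u) :=
      closureC_mono E d0 (fun x hx => by rw [List.mem_singleton.1 hx]; exact hcr)
    exact hu (h1 hin)
  have hum : u ∈ closureC E d0 [u] := subset_closureC E d0 [u] (List.mem_singleton.2 rfl)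
  exact lt_length_of_nodup_ssubset (nodup_closureC E d0 [c]) (nodup_closureC E d0 [u])
    hsub hum hnotin

-- ---------- stabilization of the fueled spec ----------

theorem dspec_stable_aux (E : List (String × List String)) (d0 : List (String × Int))
    (RR : List String)
    (hclosed : ∀ u ∈ RR, rstepP E d0 u ⊆ RR)
    (hacy : ∀ u ∈ RR, u ∉ closureC E d0 (rstepP E d0 u)) :
    ∀ (b : Nat) (u : String), u ∈ RR → ∀ (n m : Nat), KK E d0 u ≤ b → KK E d0 u ≤ n → KK E d0 u ≤ m →
      dspec E d0 n u = dspec E d0 m u := by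
  intro b
  induction b with
  | zero => intro u _ n m hb _ _; exact absurd hb (by have := KK_pos E d0 u; omega)
  | succ k ih =>
    intro u hu n m hb hn hm
    have hp := KK_pos E d0 u
    obtain ⟨n', rfl⟩ : ∃ n', n = n' + 1 := ⟨n - 1, by omega⟩
    obtain ⟨m', rfl⟩ : ∃ m', m = m' + 1 := ⟨m - 1, by omega⟩
    show dspec E d0 (n'+1) u = dspec E d0 (m'+1) u
    simp only [dspec]
    cases hd : PySem.Dict.get? (⟨d0⟩ : PySem.Dict String Int) u with
    | some x => rfl
    | none =>
      cases hE : pvLookE E u with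
      | none => rfl
      | some l =>
        have hrs : rstepP E d0 u = l := rstepP_eq_of hd hE
        have hmaps : l.map (dspec E d0 n') = l.map (dspec E d0 m') := by
          apply List.map_congr_left
          intro c hc
          have hlt := KK_lt E d0 (hacy u hu) hd hE hc
          have hcR : c ∈ RR := hclosed u hu (by rw [hrs]; exact hc)
          exact ih c hcR n' m' (by omega) (by omega) (by omega)
        dsimp only
        rw [hmaps]

theorem dspec_depthV (E : List (String × List String)) (d0 : List (String × Int))
    (RR : List String)
    (hclosed : ∀ u ∈ RR, rstepP E d0 u ⊆ RR)
    (hacy : ∀ u ∈ RR, u ∉ closureC E d0 (rstepP E d0 u))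
    {u : String} (hu : u ∈ RR) {n : Nat} (hn : KK E d0 u ≤ n) :
    dspec E d0 n u = depthV E d0 u :=
  dspec_stable_aux E d0 RR hclosed hacy n u hu n (KK E d0 u) hn hn (le_refl _)

theorem depthV_memo (E : List (String × List String)) (d0 : List (String × Int))
    {u : String} {x : Int}
    (hd : PySem.Dict.get? (⟨d0⟩ : PySem.Dict String Int) u = some x) :
    depthV E d0 u = x := by
  have hp := KK_pos E d0 u
  obtain ⟨k, hk⟩ : ∃ k, KK E d0 u = k + 1 := ⟨KK E d0 u - 1, by omega⟩
  unfold depthV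
  rw [hk]
  simp [dspec, hd]

theorem depthV_leaf (E : List (String × List String)) (d0 : List (String × Int))
    {u : String}
    (hd : PySem.Dict.get? (⟨d0⟩ : PySem.Dict String Int) u = none)
    (hE : pvLookE E u = none) : depthV E d0 u = 0 := by
  have hp := KK_pos E d0 u
  obtain ⟨k, hk⟩ : ∃ k, KK E d0 u = k + 1 := ⟨KK E d0 u - 1, by omega⟩
  unfold depthV
  rw [hk]
  simp [dspec, hd, hE]

theorem depthV_node (E : List (String × List String)) (d0 : List (String × Int))
    (RR : List String)
    (hclosed : ∀ u ∈ RR, rstepP E d0 u ⊆ RR)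
    (hacy : ∀ u ∈ RR, u ∉ closureC E d0 (rstepP E d0 u))
    {u : String} {l : List String} (hu : u ∈ RR)
    (hd : PySem.Dict.get? (⟨d0⟩ : PySem.Dict String Int) u = none)
    (hE : pvLookE E u = some l) :
    depthV E d0 u = 1 + (PySem.List.max? (l.map (depthV E d0)) (fun y => y)).getD 0 := by
  have hp := KK_pos E d0 u
  obtain ⟨k, hk⟩ : ∃ k, KK E d0 u = k + 1 := ⟨KK E d0 u - 1, by omega⟩
  have hrs : rstepP E d0 u = l := rstepP_eq_of hd hE
  have hmaps : l.map (dspec E d0 k) = l.map (depthV E d0) := by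
    apply List.map_congr_left
    intro c hc
    have hlt := KK_lt E d0 (hacy u hu) hd hE hc
    have hcR : c ∈ RR := hclosed u hu (by rw [hrs]; exact hc)
    exact dspec_depthV E d0 RR hclosed hacy hcR (by omega)
  conv_lhs => rw [show depthV E d0 u = dspec E d0 (KK E d0 u) u from rfl, hk]
  simp only [dspec, hd, hE]
  rw [hmaps]

-- ---------- the dmap invariant ----------

def InvD (E : List (String × List String)) (d0 : List (String × Int))
    (d : PySem.Dict String Int) : Prop :=
  (∀ u x, d.get? u = some x → x = depthV E d0 u) ∧
  (∀ u, (PySem.Dict.get? (⟨d0⟩ : PySem.Dict String Int) u).isSome → (d.get? u).isSome)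

theorem InvD_init (E : List (String × List String)) (d0 : List (String × Int)) :
    InvD E d0 ⟨d0⟩ := by
  constructor
  · intro u x h; exact (depthV_memo E d0 h).symm
  · intro u h; exact h

theorem InvD_insert (E : List (String × List String)) (d0 : List (String × Int))
    {d : PySem.Dict String Int} (hI : InvD E d0 d) {u : String} {z : Int}
    (hz : z = depthV E d0 u) : InvD E d0 (d.insert u z) := by
  constructor
  · intro w x h
    rw [PySem.Dict.get?_insert] at h
    by_cases hw : w = u
    · simp [hw] at h; subst hw; rw [← h]; exact hz
    · simp [hw] at h; exact hI.1 w x h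
  · intro w h
    rw [PySem.Dict.get?_insert]
    by_cases hw : w = u
    · simp [hw]
    · simp [hw]; exact hI.2 w h

theorem InvD_none (E : List (String × List String)) (d0 : List (String × Int))
    {d : PySem.Dict String Int} (hI : InvD E d0 d) {u : String}
    (h : d.get? u = none) :
    PySem.Dict.get? (⟨d0⟩ : PySem.Dict String Int) u = none := by
  cases hd : PySem.Dict.get? (⟨d0⟩ : PySem.Dict String Int) u with
  | none => rfl
  | some x =>
    have := hI.2 u (by rw [hd]; rfl)
    rw [h] at this; exact absurd this (by simp)

-- ---------- correctness of port A ----------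

theorem pyA_correct (E : List (String × List String)) (d0 : List (String × Int))
    (RR : List String)
    (hclosed : ∀ u ∈ RR, rstepP E d0 u ⊆ RR)
    (hacy : ∀ u ∈ RR, u ∉ closureC E d0 (rstepP E d0 u)) :
    ∀ (n : Nat) (u : String) (d : PySem.Dict String Int), u ∈ RR → InvD E d0 d → KK E d0 u ≤ n →
      (pyA E n u d).1 = depthV E d0 u ∧ InvD E d0 (pyA E n u d).2 := by
  intro n
  induction n with
  | zero => intro u d _ _ hn; exact absurd hn (by have := KK_pos E d0 u; omega)
  | succ k ih =>
    intro u d hu hI hn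
    show (pyA E (k+1) u d).1 = depthV E d0 u ∧ InvD E d0 (pyA E (k+1) u d).2
    simp only [pyA]
    cases hget : d.get? u with
    | some x => exact ⟨(hI.1 u x hget).symm.symm, hI⟩
    | none =>
      have hd0 : PySem.Dict.get? (⟨d0⟩ : PySem.Dict String Int) u = none := InvD_none E d0 hI hget
      cases hE : pvLookE E u with
      | none =>
        refine ⟨(depthV_leaf E d0 hd0 hE).symm, ?_⟩
        exact InvD_insert E d0 hI (depthV_leaf E d0 hd0 hE).symm
      | some l =>
        have hrs : rstepP E d0 u = l := rstepP_eq_of hd0 hE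
        have hkc : ∀ c ∈ l, c ∈ RR ∧ KK E d0 c ≤ k := by
          intro c hc
          have := KK_lt E d0 (hacy u hu) hd0 hE hc
          exact ⟨hclosed u hu (by rw [hrs]; exact hc), by omega⟩
        have hfold : ∀ (l' : List String), (∀ c ∈ l', c ∈ RR ∧ KK E d0 c ≤ k) →
            ∀ (acc : List Int) (d' : PySem.Dict String Int), InvD E d0 d' →
            (l'.foldl (fun acc c => let r := pyA E k c acc.2; (acc.1 ++ [r.1], r.2)) (acc, d')).1
              = acc ++ l'.map (depthV E d0) ∧
            InvD E d0 (l'.foldl (fun acc c => let r := pyA E k c acc.2; (acc.1 ++ [r.1], r.2)) (acc, d')).2 := by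
          intro l'
          induction l' with
          | nil => intro _ acc d' hI'; exact ⟨by simp, hI'⟩
          | cons c cs ihl =>
            intro hall acc d' hI'
            have hc := ih c d' (hall c List.mem_cons_self).1 hI' (hall c List.mem_cons_self).2
            have hrec := ihl (fun x hx => hall x (List.mem_cons_of_mem _ hx))
              (acc ++ [(pyA E k c d').1]) (pyA E k c d').2 hc.2
            simp only [List.foldl_cons]
            refine ⟨?_, hrec.2⟩
            rw [hrec.1, hc.1]
            simp
        have hres := hfold l hkc [] d hI
        simp only [List.nil_append] at hres
        constructor
        · simp only [hres.1]
          exact (depthV_node E d0 RR hclosed hacy hu hd0 hE).symm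
        · exact InvD_insert E d0 hres.2
            (by rw [hres.1]; exact (depthV_node E d0 RR hclosed hacy hu hd0 hE).symm)

theorem KK_le_fuel (E : List (String × List String)) (d0 : List (String × Int)) (v : String) :
    KK E d0 v ≤ (v :: E.flatMap (fun p => p.2)).dedup.length + 1 := by
  have hsub : closureC E d0 [v] ⊆ ([v] ++ E.flatMap (fun p => p.2)).dedup :=
    reachN_subset_univ E d0 _ [v]
  have := le_length_of_nodup_subset (nodup_closureC E d0 [v]) (List.nodup_dedup _) hsub
  unfold KK
  simp only [List.singleton_append] at this
  omega

theorem A_main (E : List (String × List String)) (d0 : List (String × Int)) (v : String)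
    (hacy : ∀ u ∈ closureC E d0 [v], u ∉ closureC E d0 (rstepP E d0 u)) :
    getDepth2_py E d0 v = depthV E d0 v := by
  unfold getDepth2_py
  exact (pyA_correct E d0 (closureC E d0 [v]) (fun u hu => closureC_closed E d0 [v] hu) hacy
    _ v ⟨d0⟩ (subset_closureC E d0 [v] (List.mem_singleton.2 rfl)) (InvD_init E d0)
    (KK_le_fuel E d0 v)).1

-- ---------- correctness of port B ----------

-- the termination potential of pyB: each stack entry (u, false) weighs
-- B^|closure u| (closure cut at the CURRENT dmap), each (u, true) weighs 1
def wBase (E : List (String × List String)) : Nat := (E.flatMap (fun p => p.2)).length + 2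

def weightE (E : List (String × List String)) (d : List (String × Int)) :
    String × Bool → Nat
  | (u, b) => if b then 1 else (wBase E) ^ (closureC E d [u]).length

def Phi (E : List (String × List String)) (d : List (String × Int))
    (S : List (String × Bool)) : Nat := (S.map (weightE E d)).sum

-- growing the dmap can only shrink closures
theorem closureC_anti (E : List (String × List String)) {d d' : List (String × Int)}
    (hmono : ∀ u, (PySem.Dict.get? (⟨d⟩ : PySem.Dict String Int) u).isSome →
      (PySem.Dict.get? (⟨d'⟩ : PySem.Dict String Int) u).isSome)
    (s : List String) : closureC E d' s ⊆ closureC E d s := by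
  apply closureC_least
  · exact subset_closureC E d s
  · intro w hw
    have hsub : rstepP E d' w ⊆ rstepP E d w := by
      unfold rstepP
      by_cases h : (PySem.Dict.get? (⟨d⟩ : PySem.Dict String Int) w).isSome
      · rw [if_pos (hmono w h)]
        intro x hx; cases hx
      · rw [if_neg h]
        by_cases h' : (PySem.Dict.get? (⟨d'⟩ : PySem.Dict String Int) w).isSome
        · rw [if_pos h']
          intro x hx; cases hx
        · rw [if_neg h']
          exact fun x hx => hx
    exact fun c hc => closureC_closed E d s hw (hsub hc)

theorem weightE_pos (E : List (String × List String)) (d : List (String × Int))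
    (e : String × Bool) : 1 ≤ weightE E d e := by
  rcases e with ⟨u, b⟩
  cases b with
  | true => simp [weightE]
  | false =>
    simp only [weightE]
    exact Nat.one_le_iff_ne_zero.2 (pow_ne_zero _ (by unfold wBase; omega))

theorem weightE_anti (E : List (String × List String)) {d d' : List (String × Int)}
    (hmono : ∀ u, (PySem.Dict.get? (⟨d⟩ : PySem.Dict String Int) u).isSome →
      (PySem.Dict.get? (⟨d'⟩ : PySem.Dict String Int) u).isSome)
    (e : String × Bool) : weightE E d' e ≤ weightE E d e := by
  rcases e with ⟨u, b⟩
  cases b with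
  | true => simp [weightE]
  | false =>
    simp only [weightE]
    apply Nat.pow_le_pow_right (by unfold wBase; omega)
    exact le_length_of_nodup_subset (nodup_closureC E d' [u]) (nodup_closureC E d [u])
      (closureC_anti E hmono [u])

theorem Phi_anti (E : List (String × List String)) {d d' : List (String × Int)}
    (hmono : ∀ u, (PySem.Dict.get? (⟨d⟩ : PySem.Dict String Int) u).isSome →
      (PySem.Dict.get? (⟨d'⟩ : PySem.Dict String Int) u).isSome)
    (S : List (String × Bool)) : Phi E d' S ≤ Phi E d S := by
  unfold Phi
  induction S with
  | nil => simp
  | cons e t ih =>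
    simp only [List.map_cons, List.sum_cons]
    exact Nat.add_le_add (weightE_anti E hmono e) ih

theorem Phi_cons (E : List (String × List String)) (d : List (String × Int))
    (e : String × Bool) (S : List (String × Bool)) :
    Phi E d (e :: S) = weightE E d e + Phi E d S := by
  simp [Phi]

theorem sum_map_le (g : String → Nat) (M : Nat) :
    ∀ (xs : List String), (∀ c ∈ xs, g c ≤ M) → (xs.map g).sum ≤ xs.length * M := by
  intro xs
  induction xs with
  | nil => intro _; simp
  | cons c cs ih =>
    intro h
    simp only [List.map_cons, List.sum_cons, List.length_cons]
    have h1 := h c List.mem_cons_self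
    have h2 := ih (fun x hx => h x (List.mem_cons_of_mem _ hx))
    calc g c + (cs.map g).sum ≤ M + cs.length * M := Nat.add_le_add h1 h2
      _ = (cs.length + 1) * M := by ring

theorem length_le_flatMap (E : List (String × List String)) {u : String} {l : List String}
    (h : (u, l) ∈ E) : l.length ≤ (E.flatMap (fun p => p.2)).length := by
  induction E with
  | nil => cases h
  | cons p t ih =>
    simp only [List.flatMap_cons, List.length_append]
    rcases List.mem_cons.1 h with h1 | h2
    · cases h1; simp
    · have := ih h2; omega

-- the DFS stack invariant: for every expanded entry, each successor is either
-- already in dmap or occurs higher on the stack (`seen` collects the higher names)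
def Inv2Aux (E : List (String × List String)) (d : PySem.Dict String Int) :
    List String → List (String × Bool) → Prop
  | _, [] => True
  | seen, (u, b) :: t =>
      (b = true → ∀ c ∈ (pvLookE E u).getD [], (d.get? c).isSome ∨ c ∈ seen) ∧
      Inv2Aux E d (u :: seen) t

theorem Inv2Aux_mono (E : List (String × List String)) {d d' : PySem.Dict String Int}
    (hd : ∀ c, (d.get? c).isSome → (d'.get? c).isSome) :
    ∀ (S : List (String × Bool)) {seen seen' : List String}, seen ⊆ seen' →
      Inv2Aux E d seen S → Inv2Aux E d' seen' S := by
  intro S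
  induction S with
  | nil => intro _ _ _ _; trivial
  | cons e t ih =>
    rcases e with ⟨u, b⟩
    intro seen seen' hs h
    refine ⟨?_, ih (List.cons_subset_cons u hs) h.2⟩
    intro hb c hc
    rcases h.1 hb c hc with h1 | h2
    · exact Or.inl (hd c h1)
    · exact Or.inr (hs h2)

-- once x has landed in dmap, it can be dropped from `seen`
theorem Inv2Aux_resolve (E : List (String × List String)) {d d' : PySem.Dict String Int}
    (hd : ∀ c, (d.get? c).isSome → (d'.get? c).isSome) {x : String}
    (hx : (d'.get? x).isSome) :
    ∀ (S : List (String × Bool)) {seen : List String},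
      Inv2Aux E d (x :: seen) S → Inv2Aux E d' seen S := by
  intro S
  induction S with
  | nil => intro _ _; trivial
  | cons e t ih =>
    rcases e with ⟨u, b⟩
    intro seen h
    constructor
    · intro hb c hc
      rcases h.1 hb c hc with h1 | h2
      · exact Or.inl (hd c h1)
      · rcases List.mem_cons.1 h2 with h3 | h4
        · exact Or.inl (h3 ▸ hx)
        · exact Or.inr h4
    · apply ih
      exact Inv2Aux_mono E (fun c hc => hc) t
        (by intro a ha
            rcases List.mem_cons.1 ha with h1 | h2
            · exact List.mem_cons_of_mem _ (h1 ▸ List.mem_cons_self)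
            · rcases List.mem_cons.1 h2 with h3 | h4
              · exact h3 ▸ List.mem_cons_self
              · exact List.mem_cons_of_mem _ (List.mem_cons_of_mem _ h4)) h.2

-- pushing a block of unexpanded entries in front of an expanded one
theorem Inv2Aux_push (E : List (String × List String)) (d : PySem.Dict String Int) :
    ∀ (ms : List String) (seen : List String) (T : List (String × Bool)),
      Inv2Aux E d (ms.reverse ++ seen) T →
      Inv2Aux E d seen ((ms.map (fun c => (c, false))) ++ T) := by
  intro ms
  induction ms with
  | nil => intro seen T h; simpa using h
  | cons m t ih =>
    intro seen T h
    simp only [List.map_cons, List.cons_append, Inv2Aux]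
    refine ⟨by intro hb; exact absurd hb (by simp), ?_⟩
    apply ih
    have : t.reverse ++ (m :: seen) = (m :: t).reverse ++ seen := by
      simp
    rw [this]
    exact h

theorem pyB_correct (E : List (String × List String)) (d0 : List (String × Int))
    (RR : List String)
    (hclosed : ∀ u ∈ RR, rstepP E d0 u ⊆ RR)
    (hacy : ∀ u ∈ RR, u ∉ closureC E d0 (rstepP E d0 u)) :
    ∀ (f : Nat) (S : List (String × Bool)) (d : PySem.Dict String Int),
      InvD E d0 d →
      (∀ e ∈ S, e.1 ∈ RR) →
      Inv2Aux E d [] S →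
      Phi E d.items S < f →
      InvD E d0 (pyB E f S d) ∧
      (∀ u, (d.get? u).isSome → ((pyB E f S d).get? u).isSome) ∧
      (∀ e ∈ S, ((pyB E f S d).get? e.1).isSome) := by
  intro f
  induction f with
  | zero => intro S d _ _ _ hP; omega
  | succ g ih =>
    intro S d hI hmem h2 hP
    cases S with
    | nil =>
      refine ⟨hI, fun u h => h, ?_⟩
      intro e he; cases he
    | cons e rest =>
      rcases e with ⟨node, expanded⟩
      rw [Phi_cons] at hP
      have hw1 := weightE_pos E d.items (node, expanded)
      show InvD E d0 (pyB E (g+1) ((node, expanded) :: rest) d) ∧ _ ∧ _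
      simp only [pyB]
      by_cases hnd : (d.get? node).isSome
      · -- node already in dmap: pop
        rw [if_pos hnd]
        have hrec := ih rest d hI (fun e he => hmem e (List.mem_cons_of_mem _ he))
          (Inv2Aux_resolve E (fun c hc => hc) hnd rest h2.2) (by omega)
        refine ⟨hrec.1, hrec.2.1, ?_⟩
        intro e he
        rcases List.mem_cons.1 he with h1 | h1
        · rw [h1]; exact hrec.2.1 node hnd
        · exact hrec.2.2 e h1
      · rw [if_neg hnd]
        have hget : d.get? node = none := by
          cases hx : d.get? node with
          | none => rfl
          | some y => rw [hx] at hnd; simp at hnd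
        have hd0 : PySem.Dict.get? (⟨d0⟩ : PySem.Dict String Int) node = none :=
          InvD_none E d0 hI hget
        have hnR : node ∈ RR := hmem (node, expanded) List.mem_cons_self
        cases hE : pvLookE E node with
        | none =>
          -- leaf: dmap[node] = 0
          set d' := d.insert node 0 with hd'
          have hmono : ∀ c, (d.get? c).isSome → (d'.get? c).isSome := by
            intro c hc
            rw [hd', PySem.Dict.get?_insert]
            split <;> simp [hc]
          have hns : (d'.get? node).isSome := by
            rw [hd', PySem.Dict.get?_insert]; simp
          have hI' : InvD E d0 d' := InvD_insert E d0 hI (depthV_leaf E d0 hd0 hE).symm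
          have hPle : Phi E d'.items rest ≤ Phi E d.items rest := Phi_anti E hmono rest
          have hrec := ih rest d' hI' (fun e he => hmem e (List.mem_cons_of_mem _ he))
            (Inv2Aux_resolve E hmono hns rest h2.2) (by omega)
          refine ⟨hrec.1, fun u hu => hrec.2.1 u (hmono u hu), ?_⟩
          intro e he
          rcases List.mem_cons.1 he with h1 | h1
          · rw [h1]; exact hrec.2.1 node hns
          · exact hrec.2.2 e h1
        | some l =>
          have hrs : rstepP E d0 node = l := rstepP_eq_of hd0 hE
          cases hex : expanded with
          | true =>
            -- resolve: all successors are in dmap by the stack invariant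
            have hchild : ∀ c ∈ l, (d.get? c).isSome := by
              intro c hc
              have := h2.1 hex c (by rw [hE]; simpa using hc)
              rcases this with h1 | h1
              · exact h1
              · cases h1
            have hmapval : l.map (fun c => (d.get? c).getD 0) = l.map (depthV E d0) := by
              apply List.map_congr_left
              intro c hc
              rcases Option.isSome_iff_exists.1 (hchild c hc) with ⟨y, hy⟩
              rw [hy]
              simp [hI.1 c y hy]
            have hval : (1 : Int) + (PySem.List.max? (l.map (fun c => (d.get? c).getD 0)) (fun y => y)).getD 0
                = depthV E d0 node := by
              rw [hmapval]
              exact (depthV_node E d0 RR hclosed hacy hnR hd0 hE).symm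
            set d' := d.insert node (1 + (PySem.List.max? (l.map (fun c => (d.get? c).getD 0)) (fun y => y)).getD 0) with hd'
            have hmono : ∀ c, (d.get? c).isSome → (d'.get? c).isSome := by
              intro c hc
              rw [hd', PySem.Dict.get?_insert]
              split <;> simp [hc]
            have hns : (d'.get? node).isSome := by
              rw [hd', PySem.Dict.get?_insert]; simp
            have hI' : InvD E d0 d' := InvD_insert E d0 hI hval
            have hPle : Phi E d'.items rest ≤ Phi E d.items rest := Phi_anti E hmono rest
            have hrec := ih rest d' hI' (fun e he => hmem e (List.mem_cons_of_mem _ he))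
              (Inv2Aux_resolve E hmono hns rest h2.2) (by omega)
            refine ⟨hrec.1, fun u hu => hrec.2.1 u (hmono u hu), ?_⟩
            intro e he
            rcases List.mem_cons.1 he with h1 | h1
            · rw [h1]; exact hrec.2.1 node hns
            · exact hrec.2.2 e h1
          | false =>
            -- expand: push (node, true) and the successors
            set S' := (l.map (fun c => (c, false))).reverse ++ (node, true) :: rest with hS'
            have hmem' : ∀ e ∈ S', e.1 ∈ RR := by
              intro e he
              rw [hS'] at he
              rcases List.mem_append.1 he with h1 | h1
              · rcases List.mem_reverse.1 h1 with h1
                rcases List.mem_map.1 h1 with ⟨c, hc, hec⟩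
                rw [← hec]
                exact hclosed node hnR (by rw [hrs]; exact hc)
              · rcases List.mem_cons.1 h1 with h3 | h3
                · rw [h3]; exact hnR
                · exact hmem e (List.mem_cons_of_mem _ h3)
            have h2' : Inv2Aux E d [] S' := by
              rw [hS', ← List.map_reverse]
              apply Inv2Aux_push E d l.reverse [] ((node, true) :: rest)
              rw [List.reverse_reverse, List.append_nil]
              simp only [Inv2Aux]
              refine ⟨?_, ?_⟩
              · intro _ c hc
                rw [hE] at hc
                exact Or.inr (by simpa using hc)
              · exact Inv2Aux_mono E (fun c hc => hc) rest
                  (by intro a ha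
                      rcases List.mem_cons.1 ha with h3 | h3
                      · exact h3 ▸ List.mem_cons_self
                      · cases h3) h2.2
            -- the potential strictly drops
            have hKpos := KK_pos E d.items node
            have hTlt : ∀ c ∈ l, (closureC E d.items [c]).length ≤ (closureC E d.items [node]).length - 1 := by
              intro c hc
              -- acyclicity at node w.r.t. the current dmap, pulled back from d0
              have hmono0 : ∀ u, (PySem.Dict.get? (⟨d0⟩ : PySem.Dict String Int) u).isSome →
                  (PySem.Dict.get? (⟨d.items⟩ : PySem.Dict String Int) u).isSome := hI.2
              have hnd' : PySem.Dict.get? (⟨d.items⟩ : PySem.Dict String Int) node = none := hget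
              have hrs' : rstepP E d.items node = l := rstepP_eq_of hnd' hE
              have hacy' : node ∉ closureC E d.items (rstepP E d.items node) := by
                intro hin
                apply hacy node hnR
                rw [hrs]
                rw [hrs'] at hin
                exact closureC_anti E hmono0 l hin
              have := KK_lt E d.items hacy' hnd' hE hc
              unfold KK at this
              omega
            have hllen : l.length ≤ wBase E - 2 := by
              have := length_le_flatMap E (pvLookE_mem hE)
              unfold wBase; omega
            have hTpos : 1 ≤ (closureC E d.items [node]).length := by
              have := KK_pos E d.items node
              unfold KK at this; omega
            have hsum : ((l.map (fun c => (c, false))).map (weightE E d.items)).sum + 1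
                < wBase E ^ (closureC E d.items [node]).length := by
              have hmapeq : (l.map (fun c => (c, false))).map (weightE E d.items)
                  = l.map (fun c => wBase E ^ (closureC E d.items [c]).length) := by
                rw [List.map_map]; rfl
              rw [hmapeq]
              have hb2 : 2 ≤ wBase E := by unfold wBase; omega
              have hbound : (l.map (fun c => wBase E ^ (closureC E d.items [c]).length)).sum
                  ≤ l.length * wBase E ^ ((closureC E d.items [node]).length - 1) :=
                sum_map_le _ _ l (fun c hc => Nat.pow_le_pow_right (by omega) (hTlt c hc))
              have hpow1 : 1 ≤ wBase E ^ ((closureC E d.items [node]).length - 1) :=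
                Nat.one_le_iff_ne_zero.2 (pow_ne_zero _ (by omega))
              have hllen2 : l.length + 2 ≤ wBase E := by
                have := length_le_flatMap E (pvLookE_mem hE)
                unfold wBase; omega
              have hmul : (l.length + 2) * wBase E ^ ((closureC E d.items [node]).length - 1)
                  ≤ wBase E * wBase E ^ ((closureC E d.items [node]).length - 1) :=
                Nat.mul_le_mul_right _ hllen2
              have hsplit : wBase E ^ (closureC E d.items [node]).length
                  = wBase E * wBase E ^ ((closureC E d.items [node]).length - 1) := by
                conv_lhs => rw [show (closureC E d.items [node]).length
                  = ((closureC E d.items [node]).length - 1) + 1 by omega]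
                rw [pow_succ]
                ring
              rw [hsplit]
              nlinarith [hbound, hpow1, hmul]
            have hPlt : Phi E d.items S' < g := by
              have hphiS' : Phi E d.items S'
                  = ((l.map (fun c => (c, false))).map (weightE E d.items)).sum
                    + (1 + Phi E d.items rest) := by
                rw [hS']
                unfold Phi
                rw [List.map_append, List.sum_append, List.map_reverse, List.sum_reverse]
                simp only [List.map_cons, List.sum_cons]
                have hwt : weightE E d.items (node, true) = 1 := rfl
                rw [hwt]
              have hwE : weightE E d.items (node, expanded)
                  = wBase E ^ (closureC E d.items [node]).length := by
                rw [hex]; rfl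
              rw [hwE] at hP
              omega
            have hrec := ih S' d hI hmem' h2' hPlt
            refine ⟨hrec.1, hrec.2.1, ?_⟩
            intro e he
            rcases List.mem_cons.1 he with h1 | h1
            · rw [h1]
              exact hrec.2.2 (node, true) (by rw [hS']; exact List.mem_append_right _ List.mem_cons_self)
            · exact hrec.2.2 e (by rw [hS']; exact List.mem_append_right _ (List.mem_cons_of_mem _ h1))

theorem B_main (E : List (String × List String)) (d0 : List (String × Int)) (v : String)
    (hacy : ∀ u ∈ closureC E d0 [v], u ∉ closureC E d0 (rstepP E d0 u)) :
    getDepth2_py_alt E d0 v = depthV E d0 v := by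
  have hvR : v ∈ closureC E d0 [v] := subset_closureC E d0 [v] (List.mem_singleton.2 rfl)
  have h2 : Inv2Aux E (⟨d0⟩ : PySem.Dict String Int) [] [(v, false)] := by
    simp only [Inv2Aux]
    exact ⟨by intro hb; exact absurd hb (by simp), trivial⟩
  have hTv : (closureC E d0 [v]).length ≤ (v :: E.flatMap (fun p => p.2)).dedup.length := by
    have hsub : closureC E d0 [v] ⊆ ([v] ++ E.flatMap (fun p => p.2)).dedup :=
      reachN_subset_univ E d0 _ [v]
    have := le_length_of_nodup_subset (nodup_closureC E d0 [v]) (List.nodup_dedup _) hsub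
    simpa using this
  have hb2 : 2 ≤ wBase E := by unfold wBase; omega
  have hP : Phi E (⟨d0⟩ : PySem.Dict String Int).items [(v, false)]
      < wBase E ^ ((v :: E.flatMap (fun p => p.2)).dedup.length + 1) + 1 := by
    unfold Phi
    simp only [List.map_cons, List.map_nil, List.sum_cons, List.sum_nil]
    have hw : weightE E d0 (v, false) = wBase E ^ (closureC E d0 [v]).length := rfl
    show weightE E d0 (v, false) + 0 < _
    rw [hw]
    have h1 : wBase E ^ (closureC E d0 [v]).length
        ≤ wBase E ^ ((v :: E.flatMap (fun p => p.2)).dedup.length + 1) :=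
      Nat.pow_le_pow_right (by omega) (by omega)
    omega
  have hrec := pyB_correct E d0 (closureC E d0 [v])
    (fun u hu => closureC_closed E d0 [v] hu) hacy
    (wBase E ^ ((v :: E.flatMap (fun p => p.2)).dedup.length + 1) + 1)
    [(v, false)] ⟨d0⟩ (InvD_init E d0)
    (by
      intro e he
      rcases List.mem_cons.1 he with h | h
      · rw [h]; exact hvR
      · cases h)
    h2 hP
  have hvs := hrec.2.2 (v, false) List.mem_cons_self
  rcases Option.isSome_iff_exists.1 hvs with ⟨x, hx⟩
  have hxv : x = depthV E d0 v := hrec.1.1 v x hx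
  show (((pyB E _ [(v, false)] ⟨d0⟩).get? v).getD 0) = depthV E d0 v
  unfold wBase at hx
  rw [hx]
  simpa using hxv

-- derive the RR-relative acyclicity hypothesis from Pre_
theorem hacy_of_pre (E : List (String × List String)) (d0 : List (String × Int)) (v : String)
    (hPre : ∀ u ∈ closureC E d0 [v],
      PySem.Dict.get? (⟨d0⟩ : PySem.Dict String Int) u = none →
        pvLookE E u ≠ some [] ∧ u ∉ closureC E d0 (rstepP E d0 u)) :
    ∀ u ∈ closureC E d0 [v], u ∉ closureC E d0 (rstepP E d0 u) := by
  intro u hu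
  cases hd : PySem.Dict.get? (⟨d0⟩ : PySem.Dict String Int) u with
  | none => exact (hPre u hu hd).2
  | some x =>
    rw [rstepP_eq_nil (by rw [hd]; rfl), closureC_nil]
    exact List.not_mem_nil

-- ===== VERDICT (by name: the statement is the Claim_ definition above) =====
theorem getDepth2_py_spec : Claim_equal_getDepth2_py := by
  intro edges dmap v _ hPre
  have hacy := hacy_of_pre edges dmap v hPre
  unfold Spec_getDepth2_py
  rw [A_main edges dmap v hacy, B_main edges dmap v hacy]
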